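-- pv_equiv track=rewrite | github.com/pisterlabs/promptset | data/scraping-2.0/repos/jasonyux~TriPosT/models~self_improve~word_sorting.py | _extract_rationale
-- ===== SOURCE A (Python) =====
-- def _extract_rationale(generated_attempt):
--     all_steps = generated_attempt.split('\n')
--     rationales = []
--     for step in all_steps[::-1]:
--         if "Feedback:" in step:
--             break
--         elif "Let's think step by step" in step:
--             break
--         rationales.insert(0, step)
--     return '\n'.join(rationales).strip()
-- ===== SOURCE B (Python) =====
-- def _extract_rationale(generated_attempt):
--     all_steps = generated_attempt.split('\n')
--     cut = 0
--     for i, step in enumerate(all_steps):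
--         if "Feedback:" in step or "Let's think step by step" in step:
--             cut = i + 1
--     return '\n'.join(all_steps[cut:]).strip()
-- ===== Notes on version B (the rewrite author's own statement) =====
-- stated objective: alternative
-- what changed: Replaces the backward scan with repeated insert(0, ...) by a single forward pass that tracks the split index after the last marker line and slices the list once.
import Mathlib
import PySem

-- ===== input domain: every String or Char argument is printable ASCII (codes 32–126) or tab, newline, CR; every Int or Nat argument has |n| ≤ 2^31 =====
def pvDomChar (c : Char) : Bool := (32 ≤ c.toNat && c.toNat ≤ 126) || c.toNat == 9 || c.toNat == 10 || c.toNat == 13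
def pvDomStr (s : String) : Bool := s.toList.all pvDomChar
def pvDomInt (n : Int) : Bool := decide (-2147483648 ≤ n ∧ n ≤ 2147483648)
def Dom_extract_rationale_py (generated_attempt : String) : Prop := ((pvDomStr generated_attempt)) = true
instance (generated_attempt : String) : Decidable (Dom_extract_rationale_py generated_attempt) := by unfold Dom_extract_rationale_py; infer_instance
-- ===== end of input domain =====

-- B replaces A's backward scan with repeated insert(0, …) by one forward pass keeping a split index; return values proved equal on all inputs.

-- ===== PORT A =====
-- the backward loop: for step in all_steps[::-1]: break on marker, else rationales.insert(0, step)
def pvLoopA : List String → List String → List String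
  | [], rationales => rationales
  | step :: rest, rationales =>
    if PySem.Str.isIn "Feedback:" step then rationales
    else if PySem.Str.isIn "Let's think step by step" step then rationales
    else pvLoopA rest (step :: rationales)

def extract_rationale_py (generated_attempt : String) : String :=
  let all_steps := (PySem.Str.split? generated_attempt "\n").getD []
  let rationales := pvLoopA ((PySem.List.slice? all_steps none none (-1)).getD []) []
  PySem.Str.strip (PySem.Str.join "\n" rationales)

-- ===== PORT B =====
def extract_rationale_py_alt (generated_attempt : String) : String :=
  let all_steps := (PySem.Str.split? generated_attempt "\n").getD []
  let cut : Int := (PySem.List.enumerate all_steps).foldl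
    (fun c p =>
      if PySem.Str.isIn "Feedback:" p.2 || PySem.Str.isIn "Let's think step by step" p.2
      then p.1 + 1 else c) 0
  PySem.Str.strip (PySem.Str.join "\n" (PySem.List.slice all_steps (some cut) none))

-- ===== PRECONDITION & SPEC =====
def Spec_extract_rationale_py (generated_attempt : String) (out : String) : Prop := out = extract_rationale_py_alt generated_attempt
instance (generated_attempt : String) (out : String) : Decidable (Spec_extract_rationale_py generated_attempt out) := by unfold Spec_extract_rationale_py; infer_instance

-- ===== CLAIM (what is proved, stated in full; the proofs are below) =====
def Claim_equal_extract_rationale_py : Prop := ∀ (generated_attempt : String), Dom_extract_rationale_py generated_attempt → Spec_extract_rationale_py generated_attempt (extract_rationale_py generated_attempt)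

-- ===== LEMMAS AND PROOFS =====

-- "line is a marker line"
def pvMarker (s : String) : Bool :=
  PySem.Str.isIn "Feedback:" s || PySem.Str.isIn "Let's think step by step" s

theorem pvIfIf {α : Type} (a b : Bool) (acc X : α) :
    (if a = true then acc else if b = true then acc else X) = if (a || b) = true then acc else X := by
  cases a <;> cases b <;> simp

theorem pvLoopA_eq (r acc : List String) :
    pvLoopA r acc = (r.takeWhile (fun s => !pvMarker s)).reverse ++ acc := by
  induction r generalizing acc with
  | nil => simp [pvLoopA]
  | cons step rest ih =>
    show (if PySem.Str.isIn "Feedback:" step = true then acc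
          else if PySem.Str.isIn "Let's think step by step" step = true then acc
          else pvLoopA rest (step :: acc)) = _
    rw [pvIfIf, List.takeWhile_cons]
    cases hm : pvMarker step with
    | false =>
      rw [if_neg (by rw [show (PySem.Str.isIn "Feedback:" step || PySem.Str.isIn "Let's think step by step" step) = pvMarker step from rfl, hm]; simp), ih]
      simp
    | true =>
      rw [if_pos (by rw [show (PySem.Str.isIn "Feedback:" step || PySem.Str.isIn "Let's think step by step" step) = pvMarker step from rfl, hm])]
      simp

theorem pvFoldB_eq (l : List String) :
    (PySem.List.enumerate l).foldl
      (fun c p =>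
        if PySem.Str.isIn "Feedback:" p.2 || PySem.Str.isIn "Let's think step by step" p.2
        then p.1 + 1 else c) 0
      = ((l.rdropWhile (fun s => !pvMarker s)).length : Int) := by
  show (PySem.List.enumerate l).foldl (fun c p => if pvMarker p.2 = true then p.1 + 1 else c) 0 = _
  induction l using List.reverseRecOn with
  | nil => simp [PySem.List.enumerate, List.rdropWhile]
  | append_singleton l x ih =>
    rw [PySem.List.enumerate_append, List.foldl_append, ih, List.rdropWhile_concat]
    show (List.foldl _ _ (PySem.List.enumerate [x] (0 + l.length))) = _
    cases hm : pvMarker x with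
    | false => simp [PySem.List.enumerate, List.foldl, hm]
    | true => simp [PySem.List.enumerate, List.foldl, hm]

theorem pvTail_eq (p : String → Bool) (l : List String) :
    l.drop (List.rdropWhile p l).length = (List.takeWhile p l.reverse).reverse :=
  calc l.drop (List.rdropWhile p l).length
      = (List.rdropWhile p l ++ List.rtakeWhile p l).drop (List.rdropWhile p l).length :=
        (congrArg (fun t => List.drop (List.rdropWhile p l).length t)
          (List.rdropWhile_append_rtakeWhile (p := p) (l := l))).symm
    _ = List.rtakeWhile p l := List.drop_left
    _ = (List.takeWhile p l.reverse).reverse := rfl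

theorem extract_rationale_py_spec : Claim_equal_extract_rationale_py := by
  intro s _
  show extract_rationale_py s = extract_rationale_py_alt s
  unfold extract_rationale_py extract_rationale_py_alt
  simp only [PySem.List.slice?_none_none_neg_one, Option.getD_some, pvLoopA_eq, pvFoldB_eq,
    List.append_nil]
  rw [PySem.List.slice_from_natCast, pvTail_eq]
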